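-- pv_equiv track=rewrite | github.com/madhurragarwal/Ai_req_gath | frontend.py | prioritize_requirements
-- ===== SOURCE A (Python) =====
-- def prioritize_requirements(functional_reqs, non_functional_reqs):
--     must_have = []
--     should_have = []
--     could_have = []
--     wont_have = []
--
--     for req in functional_reqs + non_functional_reqs:
--         if "must" in req.lower() or "required" in req.lower():
--             must_have.append(req)
--         elif "should" in req.lower():
--             should_have.append(req)
--         elif "could" in req.lower():
--             could_have.append(req)
--         else:
--             wont_have.append(req)
--
--     return must_have, should_have, could_have, wont_have
-- ===== SOURCE B (Python) =====
-- def prioritize_requirements(functional_reqs, non_functional_reqs):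
--     reqs = functional_reqs + non_functional_reqs
--
--     def is_must(r):
--         low = r.lower()
--         return "must" in low or "required" in low
--
--     def is_should(r):
--         return "should" in r.lower() and not is_must(r)
--
--     def is_could(r):
--         low = r.lower()
--         return "could" in low and not is_must(r) and "should" not in low
--
--     def is_wont(r):
--         low = r.lower()
--         return not is_must(r) and "should" not in low and "could" not in low
--
--     return ([r for r in reqs if is_must(r)],
--             [r for r in reqs if is_should(r)],
--             [r for r in reqs if is_could(r)],
--             [r for r in reqs if is_wont(r)])
-- ===== Notes on version B (the rewrite author's own statement) =====
-- stated objective: alternative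
-- what changed: Replaces the single if/elif loop accumulating four lists with four independent filtering passes over the concatenated list, each bucket's predicate encoding the elif precedence by negated higher-priority conditions.
import Mathlib
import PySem

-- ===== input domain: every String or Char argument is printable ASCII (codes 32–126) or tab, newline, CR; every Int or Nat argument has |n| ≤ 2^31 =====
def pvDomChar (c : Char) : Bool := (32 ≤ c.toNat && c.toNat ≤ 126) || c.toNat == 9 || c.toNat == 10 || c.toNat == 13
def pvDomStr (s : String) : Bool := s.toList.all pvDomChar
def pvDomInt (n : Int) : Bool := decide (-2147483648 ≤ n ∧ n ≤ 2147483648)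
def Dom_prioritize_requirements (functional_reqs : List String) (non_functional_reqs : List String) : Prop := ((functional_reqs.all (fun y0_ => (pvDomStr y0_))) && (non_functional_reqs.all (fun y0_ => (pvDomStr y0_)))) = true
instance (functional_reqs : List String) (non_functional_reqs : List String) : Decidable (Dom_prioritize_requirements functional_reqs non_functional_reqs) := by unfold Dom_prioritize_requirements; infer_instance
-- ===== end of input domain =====

-- B rebuilds the four buckets as four independent filter passes over the concatenated list (alternative decomposition, same cost).


-- ===== PORT A =====
def pvStepA (acc : List String × List String × List String × List String) (req : String) :
    List String × List String × List String × List String :=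
  let (m, s, c, w) := acc
  if PySem.Str.isIn "must" (PySem.Str.lower req) || PySem.Str.isIn "required" (PySem.Str.lower req) then
    (m ++ [req], s, c, w)
  else if PySem.Str.isIn "should" (PySem.Str.lower req) then
    (m, s ++ [req], c, w)
  else if PySem.Str.isIn "could" (PySem.Str.lower req) then
    (m, s, c ++ [req], w)
  else
    (m, s, c, w ++ [req])

def prioritize_requirements (functional_reqs : List String) (non_functional_reqs : List String) : List String × List String × List String × List String :=
  (functional_reqs ++ non_functional_reqs).foldl pvStepA ([], [], [], [])

-- ===== PORT B =====
def pvIsMust (r : String) : Bool :=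
  PySem.Str.isIn "must" (PySem.Str.lower r) || PySem.Str.isIn "required" (PySem.Str.lower r)

def pvIsShould (r : String) : Bool :=
  PySem.Str.isIn "should" (PySem.Str.lower r) && !pvIsMust r

def pvIsCould (r : String) : Bool :=
  PySem.Str.isIn "could" (PySem.Str.lower r) && !pvIsMust r && !PySem.Str.isIn "should" (PySem.Str.lower r)

def pvIsWont (r : String) : Bool :=
  !pvIsMust r && !PySem.Str.isIn "should" (PySem.Str.lower r) && !PySem.Str.isIn "could" (PySem.Str.lower r)

def prioritize_requirements_alt (functional_reqs : List String) (non_functional_reqs : List String) : List String × List String × List String × List String :=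
  let reqs := functional_reqs ++ non_functional_reqs
  (reqs.filter pvIsMust, reqs.filter pvIsShould, reqs.filter pvIsCould, reqs.filter pvIsWont)

-- ===== PRECONDITION & SPEC =====
def Spec_prioritize_requirements (functional_reqs : List String) (non_functional_reqs : List String) (out : List String × List String × List String × List String) : Prop := out = prioritize_requirements_alt functional_reqs non_functional_reqs
instance (functional_reqs : List String) (non_functional_reqs : List String) (out : List String × List String × List String × List String) : Decidable (Spec_prioritize_requirements functional_reqs non_functional_reqs out) := by unfold Spec_prioritize_requirements; infer_instance

-- ===== CLAIM (what is proved, stated in full; the proofs are below) =====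
def Claim_equal_prioritize_requirements : Prop := ∀ (functional_reqs : List String) (non_functional_reqs : List String), Dom_prioritize_requirements functional_reqs non_functional_reqs → Spec_prioritize_requirements functional_reqs non_functional_reqs (prioritize_requirements functional_reqs non_functional_reqs)

-- ===== LEMMAS AND PROOFS =====
theorem foldl_pvStepA (l : List String) (m s c w : List String) :
    l.foldl pvStepA (m, s, c, w) =
      (m ++ l.filter pvIsMust, s ++ l.filter pvIsShould, c ++ l.filter pvIsCould, w ++ l.filter pvIsWont) := by
  induction l generalizing m s c w with
  | nil => simp
  | cons r t ih =>
    simp only [List.foldl_cons, List.filter_cons, pvStepA, pvIsMust, pvIsShould, pvIsCould,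
      pvIsWont, Bool.and_eq_true, Bool.or_eq_true, Bool.not_eq_eq_eq_not, Bool.not_true,
      PySem.Str.isIn, PySem.Str.toList_lower]
    by_cases h1 : PySem.Chars.isIn ['m','u','s','t'] (PySem.Chars.lower r.toList) = true <;>
      by_cases h2 : PySem.Chars.isIn ['r','e','q','u','i','r','e','d'] (PySem.Chars.lower r.toList) = true <;>
        by_cases h3 : PySem.Chars.isIn ['s','h','o','u','l','d'] (PySem.Chars.lower r.toList) = true <;>
          by_cases h4 : PySem.Chars.isIn ['c','o','u','l','d'] (PySem.Chars.lower r.toList) = true <;>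
            simp [h1, h2, h3, h4, ih]

-- ===== VERDICT (by name: the statement is the Claim_ definition above) =====
theorem prioritize_requirements_spec : Claim_equal_prioritize_requirements := by
  intro fr nfr _
  unfold Spec_prioritize_requirements prioritize_requirements prioritize_requirements_alt
  simp [foldl_pvStepA]
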